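-- pv_equiv track=rewrite | github.com/boemer00/ai-assistant-whatsapp-template | app/obs/logger.py | _redact_phone
-- ===== SOURCE A (Python) =====
-- from typing import Any, Dict
--
-- def _redact_phone(value: Any) -> Any:
--     s = str(value) if value is not None else ""
--     if not s:
--         return s
--     digits = [c for c in s if c.isdigit()]
--     if len(digits) < 4:
--         return "***"
--     tail = "".join(digits[-4:])
--     return f"***{tail}"
-- ===== SOURCE B (Python) =====
-- def _redact_phone(value):
--     # B: right-to-left scan with a bounded 4-element buffer; stops early once
--     # four digits are found instead of filtering the whole string.
--     s = str(value) if value is not None else ""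
--     if not s:
--         return s
--     buf = []
--     for c in reversed(s):
--         if c.isdigit():
--             buf.append(c)
--             if len(buf) == 4:
--                 break
--     if len(buf) < 4:
--         return "***"
--     return "***" + "".join(reversed(buf))
-- ===== Notes on version B (the rewrite author's own statement) =====
-- stated objective: alternative
-- what changed: B scans the string right-to-left with an early-exit bounded 4-char buffer instead of filtering all digits into a list and slicing its last four.
import Mathlib
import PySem

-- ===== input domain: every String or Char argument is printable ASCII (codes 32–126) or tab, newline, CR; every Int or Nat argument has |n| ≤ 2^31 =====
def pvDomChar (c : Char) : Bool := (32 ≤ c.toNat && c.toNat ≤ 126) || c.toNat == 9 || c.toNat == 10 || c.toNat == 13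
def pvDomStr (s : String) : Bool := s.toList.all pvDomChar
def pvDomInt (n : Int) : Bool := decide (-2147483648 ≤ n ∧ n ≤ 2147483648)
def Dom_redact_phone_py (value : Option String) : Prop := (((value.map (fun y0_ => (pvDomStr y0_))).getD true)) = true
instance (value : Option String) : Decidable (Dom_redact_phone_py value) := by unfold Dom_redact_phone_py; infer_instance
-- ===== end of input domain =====

-- B redacts by a right-to-left scan with an early-exit bounded four-char buffer
-- instead of A's full digit filter plus last-four slice; same return value.

-- ===== PORT A =====
def redact_phone_py (value : Option String) : String :=
  let s := match value with | some v => v | none => ""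
  if s.toList = [] then s
  else
    let digits := s.toList.filter PySem.Chars.isdigit
    if digits.length < 4 then "***"
    else String.ofList ('*' :: '*' :: '*' :: PySem.List.slice digits (some (-4)) none)

-- ===== PORT B =====
-- the reversed-s loop of Source B: append digits to buf, stop when buf reaches 4
def pvCollect : List Char → List Char → List Char
  | [], buf => buf
  | c :: rest, buf =>
    if PySem.Chars.isdigit c then
      let buf' := buf ++ [c]
      if buf'.length = 4 then buf' else pvCollect rest buf'
    else pvCollect rest buf

def redact_phone_py_alt (value : Option String) : String :=
  let s := match value with | some v => v | none => ""
  if s.toList = [] then s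
  else
    let buf := pvCollect s.toList.reverse []
    if buf.length < 4 then "***"
    else String.ofList ('*' :: '*' :: '*' :: buf.reverse)

-- ===== PRECONDITION & SPEC =====
def Spec_redact_phone_py (value : Option String) (out : String) : Prop := out = redact_phone_py_alt value
instance (value : Option String) (out : String) : Decidable (Spec_redact_phone_py value out) := by unfold Spec_redact_phone_py; infer_instance

-- ===== CLAIM (what is proved, stated in full; the proofs are below) =====
def Claim_equal_redact_phone_py : Prop := ∀ (value : Option String), Dom_redact_phone_py value → Spec_redact_phone_py value (redact_phone_py value)

-- ===== LEMMAS AND PROOFS =====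

-- the loop collects the first `4 - buf.length` digits of its remaining input
lemma pvCollect_eq (l : List Char) : ∀ (buf : List Char), buf.length ≤ 3 →
    pvCollect l buf = buf ++ (l.filter PySem.Chars.isdigit).take (4 - buf.length) := by
  induction l with
  | nil => intro buf _; simp [pvCollect]
  | cons c rest ih =>
    intro buf hb
    by_cases hd : PySem.Chars.isdigit c
    · simp only [pvCollect, hd, if_true, List.filter_cons, List.length_append,
        List.length_singleton]
      by_cases h4 : buf.length + 1 = 4
      · have : 4 - buf.length = 1 := by omega
        simp [h4, this]
      · have hb' : (buf ++ [c]).length ≤ 3 := by simp; omega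
        rw [if_neg (by simpa using h4), ih _ hb']
        have : 4 - buf.length = (4 - (buf ++ [c]).length) + 1 := by simp; omega
        simp [this, List.take_succ_cons]
    · simp only [pvCollect, hd, List.filter_cons]
      rw [ih _ hb]
      simp

lemma pvCollect_rev (s : List Char) :
    pvCollect s.reverse [] =
      ((s.filter PySem.Chars.isdigit).drop ((s.filter PySem.Chars.isdigit).length - 4)).reverse := by
  rw [pvCollect_eq _ [] (by simp)]
  rw [List.filter_reverse, List.take_reverse]
  simp

lemma redact_agree (s : List Char) : redact_phone_py (some (String.ofList s)) = redact_phone_py_alt (some (String.ofList s)) := by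
  unfold redact_phone_py redact_phone_py_alt
  simp only [String.toList_ofList]
  by_cases h : s = []
  · simp [h]
  · rw [if_neg h, if_neg h, pvCollect_rev]
    set d := s.filter PySem.Chars.isdigit with hd
    by_cases h4 : d.length < 4
    · rw [if_pos h4, if_pos (by simp; omega)]
    · rw [if_neg h4, if_neg (by simp; omega)]
      rw [PySem.List.slice_from_neg_ofNat d 4 (by omega)]
      simp

-- ===== VERDICT (by name: the statement is the Claim_ definition above) =====
theorem redact_phone_py_spec : Claim_equal_redact_phone_py := by
  intro value _
  unfold Spec_redact_phone_py
  cases value with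
  | none => rfl
  | some s =>
    have := redact_agree s.toList
    simpa [String.ofList_toList] using this
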